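-- pv_equiv track=rewrite | github.com/blxyon/learningMatches | textHandler.py | getActNameAndDate
-- ===== SOURCE A (Python) =====
-- def getActNameAndDate(line):
--     counter=0
--     #could have used regedex--maybe in the future I will be making this whole class regedex based
--     #as it will be much easily readable and shorter
--     #this is a bit dumb such that the user must only type one activity
--     #if they put more than one "," the program will break
--     #there is an easy fix for it, will fix later
--     dt_string=""
--     actName=""
--     readingState=False
--     for i in range(0,len(line)):
--         if (line[i]==":" and counter==0):
--             counter=counter+1
--             readingState=True
--             #we will next need to get the activity name
--         elif(counter==1 and line[i]==":"):
--             counter=counter+1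
--             readingState=True
--         elif(counter==2 and readingState==True):
--             dt_string=dt_string+line[i]
--         elif(counter==1 and line[i]=="," and readingState==True):
--             readingState=False
--         elif(counter==1 and readingState==True):
--             actName=actName+line[i]
--     return((actName,dt_string,))
-- ===== SOURCE B (Python) =====
-- def getActNameAndDate(line):
--     parts = line.split(':')
--     if len(parts) < 2:
--         return ('', '')
--     actName = parts[1].split(',')[0]
--     if len(parts) < 3:
--         dt_string = ''
--     else:
--         dt_string = ':'.join(parts[2:])
--     return (actName, dt_string)
-- ===== Notes on version B (the rewrite author's own statement) =====
-- stated objective: simpler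
-- what changed: Replaced the per-character counter/readingState machine with a single split on the colon separator: name = second part truncated at its first comma, date = the remaining parts rejoined with colons.
import Mathlib
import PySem

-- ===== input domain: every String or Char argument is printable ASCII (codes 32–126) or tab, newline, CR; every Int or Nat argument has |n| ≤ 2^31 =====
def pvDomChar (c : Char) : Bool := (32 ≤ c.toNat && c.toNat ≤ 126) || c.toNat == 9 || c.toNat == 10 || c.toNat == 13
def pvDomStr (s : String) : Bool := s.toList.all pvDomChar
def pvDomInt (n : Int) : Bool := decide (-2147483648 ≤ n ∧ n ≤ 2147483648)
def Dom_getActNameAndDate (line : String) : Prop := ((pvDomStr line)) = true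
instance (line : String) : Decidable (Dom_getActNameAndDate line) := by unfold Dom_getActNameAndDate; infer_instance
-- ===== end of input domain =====

-- B replaces A's per-character counter/readingState machine by a single split-on-':' pass (objective: simpler).

-- ===== PORT A =====
-- the for-loop of A, step for step: state (counter, readingState, actName, dt_string), one char at a time
def pvGoA (counter : Int) (reading : Bool) (actName dt : List Char) : List Char → List Char × List Char
  | [] => (actName, dt)
  | c :: rest =>
    if c == ':' && counter == 0 then
      pvGoA (counter + 1) true actName dt rest
    else if counter == 1 && c == ':' then
      pvGoA (counter + 1) true actName dt rest
    else if counter == 2 && reading then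
      pvGoA counter reading actName (dt ++ [c]) rest
    else if counter == 1 && c == ',' && reading then
      pvGoA counter false actName dt rest
    else if counter == 1 && reading then
      pvGoA counter reading (actName ++ [c]) dt rest
    else
      pvGoA counter reading actName dt rest

def getActNameAndDate (line : String) : String × String :=
  let r := pvGoA 0 false [] [] line.toList
  (String.ofList r.1, String.ofList r.2)

-- ===== PORT B =====
def getActNameAndDate_alt (line : String) : String × String :=
  let parts := line.toList.splitOn ':'
  if parts.length < 2 then ("", "")
  else
    let actName := (((parts[1]?).getD []).splitOn ',').headI
    let dt := if parts.length < 3 then ([] : List Char)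
              else List.intercalate [':'] (parts.drop 2)
    (String.ofList actName, String.ofList dt)

-- ===== PRECONDITION & SPEC =====
def Spec_getActNameAndDate (line : String) (out : String × String) : Prop := out = getActNameAndDate_alt line
instance (line : String) (out : String × String) : Decidable (Spec_getActNameAndDate line out) := by unfold Spec_getActNameAndDate; infer_instance

-- ===== CLAIM (what is proved, stated in full; the proofs are below) =====
def Claim_equal_getActNameAndDate : Prop := ∀ (line : String), Dom_getActNameAndDate line → Spec_getActNameAndDate line (getActNameAndDate line)

-- ===== LEMMAS AND PROOFS =====

-- the prefix of cs before its first ':' / the suffix after it ([] if there is none)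
def pvBefore (cs : List Char) : List Char := cs.takeWhile (· ≠ ':')
def pvAfter (cs : List Char) : List Char := (cs.dropWhile (· ≠ ':')).tail
-- the chars of cs before its first ',' or ':' (what A accumulates into actName in phase 1)
def pvNameOf (cs : List Char) : List Char := cs.takeWhile (fun c => c ≠ ',' ∧ c ≠ ':')

theorem pvAfter_cons_colon (r : List Char) : pvAfter (':' :: r) = r := by
  simp [pvAfter, List.dropWhile]

theorem pvAfter_cons_ne (c : Char) (r : List Char) (h : c ≠ ':') :
    pvAfter (c :: r) = pvAfter r := by
  simp [pvAfter, List.dropWhile, h]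

-- splitOn facts
theorem splitOn_eq_single (cs : List Char) (h : ':' ∉ cs) : cs.splitOn ':' = [cs] := by
  induction cs with
  | nil => simp
  | cons c r ih =>
    have hc : c ≠ ':' := fun hc => h (hc ▸ List.mem_cons_self)
    have hr : ':' ∉ r := fun hm => h (List.mem_cons_of_mem _ hm)
    have hthis := ih hr
    simp only [List.splitOn] at hthis ⊢
    rw [List.splitOnP_cons, if_neg (by simp [hc]), hthis]
    rfl

theorem splitOn_eq_cons (cs : List Char) (h : ':' ∈ cs) :
    cs.splitOn ':' = pvBefore cs :: (pvAfter cs).splitOn ':' := by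
  induction cs with
  | nil => simp at h
  | cons c r ih =>
    by_cases hc : c = ':'
    · subst hc
      simp [List.splitOn, List.splitOnP_cons, pvAfter_cons_colon, pvBefore, List.takeWhile]
    · have hr : ':' ∈ r := by
        rcases List.mem_cons.mp h with h1 | h1
        · exact absurd h1.symm hc
        · exact h1
      have hthis := ih hr
      simp only [List.splitOn, pvBefore] at hthis ⊢
      rw [List.splitOnP_cons, if_neg (by simp [hc]), hthis,
        pvAfter_cons_ne c r hc]
      simp [List.takeWhile, hc]

theorem headI_splitOn (a : Char) (cs : List Char) :
    (cs.splitOn a).headI = cs.takeWhile (· ≠ a) := by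
  induction cs with
  | nil => simp
  | cons c r ih =>
    by_cases hc : c = a
    · subst hc; simp [List.splitOn, List.splitOnP_cons, List.takeWhile]
    · simp only [List.splitOn] at ih ⊢
      rw [List.splitOnP_cons, if_neg (by simp [hc])]
      cases h : r.splitOnP (· == a) with
      | nil => exact absurd h (List.splitOnP_ne_nil _ r)
      | cons p ps =>
        simp [h] at ih
        simp [List.takeWhile, hc, ih]

theorem splitOn_ne_nil' (cs : List Char) : cs.splitOn ':' ≠ [] := by
  simp only [List.splitOn]; exact List.splitOnP_ne_nil _ _

-- name truncation: taking until ',' inside the colon-free prefix = taking until ',' or ':'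
theorem takeWhile_before (ds : List Char) :
    (pvBefore ds).takeWhile (· ≠ ',') = pvNameOf ds := by
  induction ds with
  | nil => simp [pvBefore, pvNameOf]
  | cons c r ih =>
    by_cases hc : c = ':'
    · subst hc; simp [pvBefore, pvNameOf, List.takeWhile]
    · by_cases hk : c = ','
      · subst hk; simp [pvBefore, pvNameOf, List.takeWhile, hc]
      · simp only [pvBefore, pvNameOf, List.takeWhile] at ih ⊢
        simp [hc, hk] at ih ⊢
        exact ih

theorem nameOf_of_not_mem (ds : List Char) (h : ':' ∉ ds) :
    pvNameOf ds = ds.takeWhile (· ≠ ',') := by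
  induction ds with
  | nil => simp [pvNameOf]
  | cons c r ih =>
    have hc : c ≠ ':' := fun hc => h (hc ▸ List.mem_cons_self)
    have hr : ':' ∉ r := fun hm => h (List.mem_cons_of_mem _ hm)
    by_cases hk : c = ','
    · subst hk; simp [pvNameOf, List.takeWhile, hc]
    · simp only [pvNameOf, List.takeWhile] at ih ⊢
      simp [hc, hk] at ih ⊢
      exact ih hr

-- A-side phase lemmas
theorem pvGoA_phase2 (cs name dt : List Char) :
    pvGoA 2 true name dt cs = (name, dt ++ cs) := by
  induction cs generalizing dt with
  | nil => simp [pvGoA]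
  | cons c r ih =>
    by_cases hc : c = ':' <;> simp [pvGoA, hc, ih]

theorem pvGoA_phase1_false (cs name dt : List Char) :
    pvGoA 1 false name dt cs =
      (name, dt ++ (if ':' ∈ cs then pvAfter cs else [])) := by
  induction cs generalizing dt with
  | nil => simp [pvGoA]
  | cons c r ih =>
    by_cases hc : c = ':'
    · subst hc
      simp [pvGoA, pvGoA_phase2, pvAfter_cons_colon]
    · simp [pvGoA, hc, ih, pvAfter_cons_ne c r hc, List.mem_cons, Ne.symm hc]

theorem pvGoA_phase1_true (cs name dt : List Char) :
    pvGoA 1 true name dt cs =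
      (name ++ pvNameOf cs,
       dt ++ (if ':' ∈ cs then pvAfter cs else [])) := by
  induction cs generalizing name dt with
  | nil => simp [pvGoA, pvNameOf]
  | cons c r ih =>
    by_cases hc : c = ':'
    · subst hc
      simp [pvGoA, pvGoA_phase2, pvAfter_cons_colon, pvNameOf, List.takeWhile]
    · by_cases hk : c = ','
      · subst hk
        simp [pvGoA, pvGoA_phase1_false, pvNameOf, List.takeWhile, pvAfter_cons_ne _ r hc,
          List.mem_cons, Ne.symm hc]
      · simp [pvGoA, hc, hk, ih, pvNameOf, List.takeWhile, pvAfter_cons_ne c r hc,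
          List.mem_cons, Ne.symm hc]

theorem pvGoA_phase0 (cs name dt : List Char) :
    pvGoA 0 false name dt cs =
      (if ':' ∈ cs then pvGoA 1 true name dt (pvAfter cs) else (name, dt)) := by
  induction cs with
  | nil => simp [pvGoA]
  | cons c r ih =>
    by_cases hc : c = ':'
    · subst hc; simp [pvGoA, pvAfter_cons_colon]
    · simp [pvGoA, hc, ih, pvAfter_cons_ne c r hc, List.mem_cons, Ne.symm hc]

theorem pv_main (cs : List Char) :
    pvGoA 0 false [] [] cs =
      (let parts := cs.splitOn ':'
       if parts.length < 2 then ([], [])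
       else
         ((((parts[1]?).getD []).splitOn ',').headI,
          if parts.length < 3 then ([] : List Char)
          else List.intercalate [':'] (parts.drop 2))) := by
  by_cases h : ':' ∈ cs
  · rw [pvGoA_phase0, if_pos h, pvGoA_phase1_true]
    show _ = (let parts := cs.splitOn ':'; _)
    rw [splitOn_eq_cons cs h]
    by_cases h2 : ':' ∈ pvAfter cs
    · rw [splitOn_eq_cons _ h2]
      obtain ⟨p, ps, hsp⟩ : ∃ p ps, (pvAfter (pvAfter cs)).splitOn ':' = p :: ps := by
        cases hx : (pvAfter (pvAfter cs)).splitOn ':' with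
        | nil => exact absurd hx (splitOn_ne_nil' _)
        | cons p ps => exact ⟨p, ps, rfl⟩
      rw [hsp]
      rw [if_neg (show ¬ ((pvBefore cs :: pvBefore (pvAfter cs) :: p :: ps).length < 2) by
            simp [List.length_cons])]
      rw [if_neg (show ¬ ((pvBefore cs :: pvBefore (pvAfter cs) :: p :: ps).length < 3) by
            simp [List.length_cons])]
      simp only [List.getElem?_cons_succ, List.getElem?_cons_zero, Option.getD_some,
        List.drop_succ_cons, List.drop_zero]
      rw [← hsp, List.intercalate_splitOn, headI_splitOn, takeWhile_before, if_pos h2]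
      simp
    · rw [splitOn_eq_single _ h2]
      rw [if_neg (show ¬ (([pvBefore cs, pvAfter cs] : List (List Char)).length < 2) by
            simp [List.length_cons])]
      rw [if_pos (show (([pvBefore cs, pvAfter cs] : List (List Char)).length < 3) by
            simp [List.length_cons])]
      simp only [List.getElem?_cons_succ, List.getElem?_cons_zero, Option.getD_some]
      rw [headI_splitOn, if_neg h2, ← nameOf_of_not_mem _ h2]
      simp
  · rw [pvGoA_phase0, if_neg h]
    rw [show cs.splitOn ':' = [cs] from splitOn_eq_single cs h]
    simp

-- ===== VERDICT (by name: the statement is the Claim_ definition above) =====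
theorem getActNameAndDate_spec : Claim_equal_getActNameAndDate := by
  intro line _
  unfold Spec_getActNameAndDate getActNameAndDate getActNameAndDate_alt
  have hm := pv_main line.toList
  simp only [hm]
  by_cases h : (line.toList.splitOn ':').length < 2 <;> simp [h]
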